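-- pv_equiv track=rewrite | github.com/az79nefy/OrdinalRL | sarsa/ordinal_sarsa_discretized_agent.py | build_obs_dict
-- ===== SOURCE A (Python) =====
-- import itertools
--
-- def build_obs_dict(observation_space):
--     # List of all possible discrete observations
--     observation_range = [range(len(i) + 1) for i in observation_space]
--     # Dictionary that maps discretized observations to array indices
--     observation_to_index = {}
--     index_counter = 0
--     for observation in list(itertools.product(*observation_range)):
--         observation_to_index[observation] = index_counter
--         index_counter += 1
--     return observation_to_index
-- ===== SOURCE B (Python) =====
-- def build_obs_dict(observation_space):
--     # Mixed-radix index->tuple decoding instead of itertools.product enumeration.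
--     sizes = [len(i) + 1 for i in observation_space]
--     strides = []
--     p = 1
--     for s in reversed(sizes):
--         strides.append(p)
--         p *= s
--     strides.reverse()
--     observation_to_index = {}
--     for idx in range(p):
--         observation_to_index[tuple((idx // st) % s for s, st in zip(sizes, strides))] = idx
--     return observation_to_index
-- ===== Notes on version B (the rewrite author's own statement) =====
-- stated objective: alternative
-- what changed: Replaces itertools.product enumeration of the coordinate ranges by a single pass over range(total) that decodes each integer index into its tuple by mixed-radix div/mod against precomputed suffix-product strides.
import Mathlib
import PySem

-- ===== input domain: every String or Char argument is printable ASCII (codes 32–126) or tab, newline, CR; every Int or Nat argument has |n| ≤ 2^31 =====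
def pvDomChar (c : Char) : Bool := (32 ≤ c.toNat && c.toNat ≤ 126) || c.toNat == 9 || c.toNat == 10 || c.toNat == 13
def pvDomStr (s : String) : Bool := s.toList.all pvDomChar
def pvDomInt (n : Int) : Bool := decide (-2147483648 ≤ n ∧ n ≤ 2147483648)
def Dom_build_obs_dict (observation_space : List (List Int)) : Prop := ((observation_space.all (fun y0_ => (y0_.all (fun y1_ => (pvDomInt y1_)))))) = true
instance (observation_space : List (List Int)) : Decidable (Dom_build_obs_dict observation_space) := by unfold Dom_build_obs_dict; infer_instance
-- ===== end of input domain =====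

-- B replaces itertools.product enumeration by mixed-radix integer-to-tuple decoding (objective: alternative algorithm, similar cost).

-- ===== PORT A =====
-- itertools.product over the given lists, in Python's order (first iterable varies slowest)
def pyProduct : List (List Int) → List (List Int)
  | [] => [[]]
  | l :: ls => l.flatMap (fun x => (pyProduct ls).map (fun t => x :: t))

def build_obs_dict (observation_space : List (List Int)) : List (List Int × Int) :=
  let observation_range := observation_space.map (fun i => PySem.List.pyRange 0 ((i.length : Int) + 1) 1)
  let st := (pyProduct observation_range).foldl
    (fun (s : PySem.Dict (List Int) Int × Int) observation => (s.1.insert observation s.2, s.2 + 1))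
    (PySem.Dict.empty, 0)
  st.1.items

-- ===== PORT B =====
def build_obs_dict_alt (observation_space : List (List Int)) : List (List Int × Int) :=
  let sizes := observation_space.map (fun i => ((i.length : Int) + 1))
  let fp := sizes.reverse.foldl (fun (acc : List Int × Int) s => (acc.1 ++ [acc.2], acc.2 * s)) ([], 1)
  let strides := fp.1.reverse
  let total := fp.2
  ((PySem.List.pyRange 0 total 1).foldl
    (fun (d : PySem.Dict (List Int) Int) idx =>
      d.insert ((sizes.zip strides).map (fun p => PySem.Int.mod (PySem.Int.floordiv idx p.2) p.1)) idx)
    PySem.Dict.empty).items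

-- ===== PRECONDITION & SPEC =====
def Spec_build_obs_dict (observation_space : List (List Int)) (out : List (List Int × Int)) : Prop := out = build_obs_dict_alt observation_space
instance (observation_space : List (List Int)) (out : List (List Int × Int)) : Decidable (Spec_build_obs_dict observation_space out) := by unfold Spec_build_obs_dict; infer_instance

-- ===== CLAIM (what is proved, stated in full; the proofs are below) =====
def Claim_equal_build_obs_dict : Prop := ∀ (observation_space : List (List Int)), Dom_build_obs_dict observation_space → Spec_build_obs_dict observation_space (build_obs_dict observation_space)

-- ===== LEMMAS AND PROOFS =====

-- B's stride/total computation, named for the proofs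
def strideF (l : List Int) : List Int × Int :=
  l.foldl (fun (acc : List Int × Int) s => (acc.1 ++ [acc.2], acc.2 * s)) ([], 1)

def totP (sizes : List Int) : Int := (strideF sizes.reverse).2
def strS (sizes : List Int) : List Int := (strideF sizes.reverse).1.reverse

-- B's per-index decoder, named for the proofs
def decodeK (sizes strides : List Int) (idx : Int) : List Int :=
  (sizes.zip strides).map (fun p => PySem.Int.mod (PySem.Int.floordiv idx p.2) p.1)

lemma strideF_append (l : List Int) (s : Int) :
    strideF (l ++ [s]) = ((strideF l).1 ++ [(strideF l).2], (strideF l).2 * s) := by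
  simp [strideF, List.foldl_append]

lemma totP_cons (s : Int) (rest : List Int) : totP (s :: rest) = totP rest * s := by
  simp [totP, strideF_append]

lemma strS_cons (s : Int) (rest : List Int) : strS (s :: rest) = totP rest :: strS rest := by
  simp [strS, totP, strideF_append]

lemma totP_pos (sizes : List Int) (h : ∀ s ∈ sizes, 1 ≤ s) : 0 < totP sizes := by
  induction sizes with
  | nil => simp [totP, strideF]
  | cons s rest ih =>
      rw [totP_cons]
      have hs : 1 ≤ s := h s (by simp)
      have := ih (fun x hx => h x (by simp [hx]))
      positivity

lemma strS_pos (sizes : List Int) (h : ∀ s ∈ sizes, 1 ≤ s) :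
    ∀ st ∈ strS sizes, 0 < st := by
  induction sizes with
  | nil => simp [strS, strideF]
  | cons s rest ih =>
      rw [strS_cons]
      intro st hst
      rcases List.mem_cons.mp hst with h' | h'
      · subst h'; exact totP_pos rest (fun x hx => h x (by simp [hx]))
      · exact ih (fun x hx => h x (by simp [hx])) st h'

lemma dvd_totP (sizes : List Int) (p : Int × Int) (hp : p ∈ sizes.zip (strS sizes)) :
    p.1 * p.2 ∣ totP sizes := by
  induction sizes generalizing p with
  | nil => simp [strS, strideF] at hp
  | cons s rest ih =>
      rw [strS_cons] at hp
      rw [totP_cons]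
      rcases List.mem_cons.mp hp with h | h
      · subst h; exact ⟨1, by ring⟩
      · exact Dvd.dvd.mul_right (ih p h) s

-- shift invariance: adding a multiple of totP doesn't change any coordinate
lemma decodeK_shift (sizes : List Int) (h1 : ∀ s ∈ sizes, 1 ≤ s) (q r : Int) :
    decodeK sizes (strS sizes) (q * totP sizes + r) = decodeK sizes (strS sizes) r := by
  unfold decodeK
  apply List.map_congr_left
  intro p hp
  obtain ⟨m, hm⟩ := dvd_totP sizes p hp
  have hmem := List.of_mem_zip hp
  have hst : 0 < p.2 := strS_pos sizes h1 p.2 hmem.2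
  have hsz : 1 ≤ p.1 := h1 p.1 hmem.1
  rw [PySem.Int.floordiv_eq_ediv_of_pos hst, PySem.Int.floordiv_eq_ediv_of_pos hst,
      PySem.Int.mod_eq_emod_of_pos (by omega), PySem.Int.mod_eq_emod_of_pos (by omega)]
  have h2 : q * totP sizes + r = r + (q * (p.1 * m)) * p.2 := by rw [hm]; ring
  rw [h2, Int.add_mul_ediv_right _ _ (by omega)]
  have h3' : r / p.2 + q * (p.1 * m) = r / p.2 + p.1 * (q * m) := by ring
  rw [h3', Int.add_mul_emod_self_left]

lemma pyRange_shift (a T : Int) :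
    PySem.List.pyRange a (a + T) 1 = (PySem.List.pyRange 0 T 1).map (fun r => a + r) := by
  simp [PySem.List.pyRange_one, List.map_map, Function.comp_def]

lemma flatMap_congr_mem {α β : Type} (l : List α) (f g : α → List β)
    (h : ∀ x ∈ l, f x = g x) : l.flatMap f = l.flatMap g := by
  induction l with
  | nil => rfl
  | cons x xs ih =>
      simp only [List.flatMap_cons]
      rw [h x (by simp), ih (fun y hy => h y (by simp [hy]))]

-- range(0, n*T) as a double loop
lemma pyRange_mul (n : Nat) (T : Int) (hT : 0 < T) :
    PySem.List.pyRange 0 ((n : Int) * T) 1 =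
      (PySem.List.pyRange 0 (n : Int) 1).flatMap
        (fun q => (PySem.List.pyRange 0 T 1).map (fun r => q * T + r)) := by
  induction n with
  | zero => simp
  | succ n ih =>
      have h1 : (0 : Int) ≤ (n : Int) * T := by positivity
      have h2 : (n : Int) * T ≤ ((n + 1 : Nat) : Int) * T := by push_cast; nlinarith
      rw [PySem.List.pyRange_one_append 0 ((n : Int) * T) (((n + 1 : Nat) : Int) * T) h1 h2, ih]
      have hsucc : ((n + 1 : Nat) : Int) = (n : Int) + 1 := by push_cast; ring
      rw [hsucc, PySem.List.pyRange_one_succ_right (by positivity), List.flatMap_append]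
      congr 1
      have hm : ((n : Int) + 1) * T = (n : Int) * T + T := by ring
      rw [hm, pyRange_shift ((n : Int) * T) T]
      simp

-- main lemma: decoding range(totP) gives exactly the cartesian product, in order
lemma decode_eq_product (sizes : List Int) (h : ∀ s ∈ sizes, 1 ≤ s) :
    (PySem.List.pyRange 0 (totP sizes) 1).map (decodeK sizes (strS sizes)) =
      pyProduct (sizes.map (fun s => PySem.List.pyRange 0 s 1)) := by
  induction sizes with
  | nil =>
      show (PySem.List.pyRange 0 (totP []) 1).map (decodeK [] (strS [])) = pyProduct []
      decide
  | cons s rest ih =>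
      have hs : 1 ≤ s := h s (by simp)
      have hrest : ∀ x ∈ rest, 1 ≤ x := fun x hx => h x (by simp [hx])
      have hT : 0 < totP rest := totP_pos rest hrest
      rw [totP_cons, strS_cons, mul_comm, List.map_cons]
      simp only [pyProduct, ← ih hrest]
      have hsT : s * totP rest = ((s.toNat : Nat) : Int) * totP rest := by
        congr 1; omega
      rw [hsT, pyRange_mul s.toNat (totP rest) hT, List.map_flatMap]
      have hback : ((s.toNat : Nat) : Int) = s := by omega
      rw [hback]
      apply flatMap_congr_mem
      intro q hq
      rw [PySem.List.mem_pyRange_one] at hq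
      rw [List.map_map, List.map_map]
      apply List.map_congr_left
      intro r hr
      rw [PySem.List.mem_pyRange_one] at hr
      simp only [Function.comp_apply]
      show decodeK (s :: rest) (totP rest :: strS rest) (q * totP rest + r) =
        q :: decodeK rest (strS rest) r
      have htail := decodeK_shift rest hrest q r
      unfold decodeK at htail ⊢
      simp only [List.zip_cons_cons, List.map_cons, htail]
      congr 1
      rw [PySem.Int.floordiv_eq_ediv_of_pos hT, PySem.Int.mod_eq_emod_of_pos (by omega)]
      have h4 : q * totP rest + r = r + q * totP rest := by ring
      rw [h4, Int.add_mul_ediv_right _ _ (by omega),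
          Int.ediv_eq_zero_of_lt hr.1 hr.2, zero_add]
      exact Int.emod_eq_of_lt hq.1 hq.2

-- a running counter starting at a, folded over range(a, a+n), equals inserting the index itself
lemma counter_fold (key : Int → List Int) :
    ∀ (n : Nat) (a : Int) (d : PySem.Dict (List Int) Int),
    ((PySem.List.pyRange a (a + (n : Int)) 1).foldl
        (fun (s : PySem.Dict (List Int) Int × Int) i => (s.1.insert (key i) s.2, s.2 + 1)) (d, a)).1 =
      (PySem.List.pyRange a (a + (n : Int)) 1).foldl (fun d i => d.insert (key i) i) d := by
  intro n
  induction n with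
  | zero => intro a d; simp [PySem.List.pyRange_one_eq_nil]
  | succ n ih =>
      intro a d
      have hlt : a < a + ((n + 1 : Nat) : Int) := by push_cast; omega
      rw [PySem.List.pyRange_one_cons hlt]
      have h5 : a + ((n + 1 : Nat) : Int) = (a + 1) + (n : Int) := by push_cast; ring
      rw [h5]
      simp only [List.foldl_cons]
      exact ih (a + 1) (d.insert (key a) a)

-- ===== VERDICT (by name: the statement is the Claim_ definition above) =====
theorem build_obs_dict_spec : Claim_equal_build_obs_dict := by
  unfold Claim_equal_build_obs_dict
  intro os _
  unfold Spec_build_obs_dict build_obs_dict build_obs_dict_alt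
  simp only []
  set sizes := os.map (fun i => ((i.length : Int) + 1)) with hsz
  have h1 : ∀ s ∈ sizes, 1 ≤ s := by
    intro s hs
    rw [hsz, List.mem_map] at hs
    obtain ⟨i, _, rfl⟩ := hs
    omega
  have hor : os.map (fun i => PySem.List.pyRange 0 ((i.length : Int) + 1) 1)
      = sizes.map (fun s => PySem.List.pyRange 0 s 1) := by
    rw [hsz, List.map_map]; rfl
  have hfp1 : (sizes.reverse.foldl (fun (acc : List Int × Int) s => (acc.1 ++ [acc.2], acc.2 * s)) ([], 1)).1.reverse = strS sizes := rfl
  have hfp2 : (sizes.reverse.foldl (fun (acc : List Int × Int) s => (acc.1 ++ [acc.2], acc.2 * s)) ([], 1)).2 = totP sizes := rfl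
  rw [hor, hfp1, hfp2, ← decode_eq_product sizes h1, List.foldl_map]
  have hT : 0 < totP sizes := totP_pos sizes h1
  have htn : (0 : Int) + ((totP sizes).toNat : Int) = totP sizes := by omega
  have := counter_fold (decodeK sizes (strS sizes)) (totP sizes).toNat 0 PySem.Dict.empty
  rw [htn] at this
  rw [this]
  rfl
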